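-- pv_equiv track=rewrite | github.com/kerbaras/astarion | src/astarion/agents/stats.py | optimize_scores_for_class
-- ===== SOURCE A (Python) =====
-- from typing import Dict, List, Any, Optional
--
-- def optimize_scores_for_class(
--
--     scores: Dict[str, int],
--     class_name: str,
--     allow_reallocation: bool = True
-- ) -> Dict[str, int]:
--     """Optimize ability scores for a specific class."""
--     # Define optimal ability priorities by class
--     class_priorities = {
--         "Fighter": ["strength", "constitution", "dexterity"],
--         "Wizard": ["intelligence", "constitution", "dexterity"],
--         "Cleric": ["wisdom", "constitution", "strength"],
--         "Rogue": ["dexterity", "intelligence", "constitution"],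
--         "Ranger": ["dexterity", "wisdom", "constitution"],
--         "Paladin": ["strength", "charisma", "constitution"],
--         "Barbarian": ["strength", "constitution", "dexterity"],
--         "Sorcerer": ["charisma", "constitution", "dexterity"],
--         "Warlock": ["charisma", "constitution", "dexterity"],
--         "Bard": ["charisma", "dexterity", "constitution"],
--         "Druid": ["wisdom", "constitution", "dexterity"],
--         "Monk": ["dexterity", "wisdom", "constitution"],
--     }
--
--     if not allow_reallocation or class_name not in class_priorities:
--         return scores
--
--     # Get current scores as a list
--     current_scores = list(scores.values())
--     current_scores.sort(reverse=True)
--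
--     # Reassign based on class priorities
--     priorities = class_priorities[class_name]
--     all_abilities = ["strength", "dexterity", "constitution", "intelligence", "wisdom", "charisma"]
--     remaining_abilities = [a for a in all_abilities if a not in priorities]
--
--     result = {}
--
--     # Assign best scores to priority abilities
--     for i, ability in enumerate(priorities[:len(current_scores)]):
--         result[ability] = current_scores[i]
--
--     # Assign remaining scores to remaining abilities
--     remaining_scores = current_scores[len(priorities):]
--     for ability, score in zip(remaining_abilities, remaining_scores):
--         result[ability] = score
--
--     return result
-- ===== SOURCE B (Python) =====
-- def optimize_scores_for_class(scores, class_name, allow_reallocation=True):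
--     """Optimize ability scores for a specific class (selection: repeatedly pull the max)."""
--     class_priorities = {
--         "Fighter": ["strength", "constitution", "dexterity"],
--         "Wizard": ["intelligence", "constitution", "dexterity"],
--         "Cleric": ["wisdom", "constitution", "strength"],
--         "Rogue": ["dexterity", "intelligence", "constitution"],
--         "Ranger": ["dexterity", "wisdom", "constitution"],
--         "Paladin": ["strength", "charisma", "constitution"],
--         "Barbarian": ["strength", "constitution", "dexterity"],
--         "Sorcerer": ["charisma", "constitution", "dexterity"],
--         "Warlock": ["charisma", "constitution", "dexterity"],
--         "Bard": ["charisma", "dexterity", "constitution"],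
--         "Druid": ["wisdom", "constitution", "dexterity"],
--         "Monk": ["dexterity", "wisdom", "constitution"],
--     }
--     if not allow_reallocation or class_name not in class_priorities:
--         return scores
--     priorities = class_priorities[class_name]
--     all_abilities = ["strength", "dexterity", "constitution", "intelligence", "wisdom", "charisma"]
--     pool = list(scores.values())
--     result = {}
--     for ability in priorities + [a for a in all_abilities if a not in priorities]:
--         if not pool:
--             break
--         best = max(pool)
--         pool.remove(best)
--         result[ability] = best
--     return result
-- ===== Notes on version B (the rewrite author's own statement) =====
-- stated objective: alternative
-- what changed: Instead of sorting the values descending and indexing/zipping them onto the slots like A, B does selection: it walks the priority-then-remaining slots once, each time extracting max(pool) from a mutable pool of the score values and assigning it, breaking when the pool empties.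
import Mathlib
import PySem

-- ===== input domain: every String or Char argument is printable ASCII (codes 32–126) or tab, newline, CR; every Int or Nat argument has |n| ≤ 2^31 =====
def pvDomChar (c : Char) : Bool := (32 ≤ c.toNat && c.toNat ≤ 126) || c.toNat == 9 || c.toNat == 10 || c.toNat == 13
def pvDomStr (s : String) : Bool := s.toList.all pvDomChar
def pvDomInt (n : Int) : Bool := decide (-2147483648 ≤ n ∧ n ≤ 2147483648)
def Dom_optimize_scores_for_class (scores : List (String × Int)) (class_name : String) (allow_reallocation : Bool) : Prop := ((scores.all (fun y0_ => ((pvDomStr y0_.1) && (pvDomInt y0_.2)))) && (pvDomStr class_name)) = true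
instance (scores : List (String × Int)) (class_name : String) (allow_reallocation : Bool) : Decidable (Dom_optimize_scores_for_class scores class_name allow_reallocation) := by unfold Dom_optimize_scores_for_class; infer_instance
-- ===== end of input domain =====

-- B replaces A's sort-then-index/zip assignment by selection: one walk over the
-- priority+remaining slots, each step extracting max(pool) from a mutable pool of values.

-- ===== PORT A =====
-- the class_priorities table (shared constant data of both Pythons)
def pvClassPriorities : PySem.Dict String (List String) :=
  PySem.Dict.ofList [
    ("Fighter", ["strength", "constitution", "dexterity"]),
    ("Wizard", ["intelligence", "constitution", "dexterity"]),
    ("Cleric", ["wisdom", "constitution", "strength"]),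
    ("Rogue", ["dexterity", "intelligence", "constitution"]),
    ("Ranger", ["dexterity", "wisdom", "constitution"]),
    ("Paladin", ["strength", "charisma", "constitution"]),
    ("Barbarian", ["strength", "constitution", "dexterity"]),
    ("Sorcerer", ["charisma", "constitution", "dexterity"]),
    ("Warlock", ["charisma", "constitution", "dexterity"]),
    ("Bard", ["charisma", "dexterity", "constitution"]),
    ("Druid", ["wisdom", "constitution", "dexterity"]),
    ("Monk", ["dexterity", "wisdom", "constitution"])]

def pvAllAbilities : List String :=
  ["strength", "dexterity", "constitution", "intelligence", "wisdom", "charisma"]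

def optimize_scores_for_class (scores : List (String × Int)) (class_name : String) (allow_reallocation : Bool) : List (String × Int) :=
  if !allow_reallocation || !(pvClassPriorities.contains class_name) then scores
  else
    -- current_scores = list(scores.values()); current_scores.sort(reverse=True)
    let current_scores := PySem.List.sorted (scores.map (·.2)) (fun x => x) true
    let priorities := (pvClassPriorities.get? class_name).getD []
    let remaining_abilities := pvAllAbilities.filter (fun a => !(priorities.contains a))
    let result : PySem.Dict String Int := PySem.Dict.empty
    -- for i, ability in enumerate(priorities[:len(current_scores)]): result[ability] = current_scores[i]
    let result := (PySem.List.enumerate (PySem.List.slice priorities none (some (current_scores.length : Int)))).foldl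
      (fun d q => d.insert q.2 (PySem.List.pyGetD current_scores q.1 0)) result
    -- remaining_scores = current_scores[len(priorities):]
    let remaining_scores := PySem.List.slice current_scores (some (priorities.length : Int)) none
    -- for ability, score in zip(remaining_abilities, remaining_scores): result[ability] = score
    let result := (remaining_abilities.zip remaining_scores).foldl (fun d q => d.insert q.1 q.2) result
    result.items

-- ===== PORT B =====
-- B's selection loop: for each slot, break on empty pool, else best = max(pool);
-- pool.remove(best); result[ability] = best
def pvSelectLoop (ordered : List String) (pool : List Int) (result : PySem.Dict String Int) : PySem.Dict String Int :=
  match ordered with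
  | [] => result
  | a :: rest =>
    if pool.isEmpty then result
    else
      let best := (PySem.List.max? pool (fun x => x)).getD 0
      let pool' := (PySem.List.remove? pool best).getD []
      pvSelectLoop rest pool' (result.insert a best)

def optimize_scores_for_class_alt (scores : List (String × Int)) (class_name : String) (allow_reallocation : Bool) : List (String × Int) :=
  if !allow_reallocation || !(pvClassPriorities.contains class_name) then scores
  else
    let priorities := (pvClassPriorities.get? class_name).getD []
    let ordered := priorities ++ pvAllAbilities.filter (fun a => !(priorities.contains a))
    (pvSelectLoop ordered (scores.map (·.2)) PySem.Dict.empty).items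

-- ===== PRECONDITION & SPEC =====
def Spec_optimize_scores_for_class (scores : List (String × Int)) (class_name : String) (allow_reallocation : Bool) (out : List (String × Int)) : Prop := out = optimize_scores_for_class_alt scores class_name allow_reallocation
instance (scores : List (String × Int)) (class_name : String) (allow_reallocation : Bool) (out : List (String × Int)) : Decidable (Spec_optimize_scores_for_class scores class_name allow_reallocation out) := by unfold Spec_optimize_scores_for_class; infer_instance

-- ===== CLAIM (what is proved, stated in full; the proofs are below) =====
def Claim_equal_optimize_scores_for_class : Prop := ∀ (scores : List (String × Int)) (class_name : String) (allow_reallocation : Bool), Dom_optimize_scores_for_class scores class_name allow_reallocation → Spec_optimize_scores_for_class scores class_name allow_reallocation (optimize_scores_for_class scores class_name allow_reallocation)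

-- ===== LEMMAS AND PROOFS =====

-- A's enumerate-and-index loop body lists exactly the pairs of p.zip cs (stated with a
-- prefix ds so the index offset is the length of what was already consumed).
theorem pv_enum_zip_aux (p : List String) (cs ds : List Int) :
    (PySem.List.enumerate (p.take cs.length) (ds.length : Int)).map
        (fun q => (q.2, PySem.List.pyGetD (ds ++ cs) q.1 0)) = p.zip cs := by
  induction p generalizing cs ds with
  | nil => simp
  | cons a p ih =>
    cases cs with
    | nil => simp
    | cons c cs =>
      have h1 : PySem.List.pyGetD (ds ++ c :: cs) (ds.length : Int) 0 = c := by
        rw [PySem.List.pyGetD_natCast]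
        simp
      have h2 := ih cs (ds ++ [c])
      simp only [List.length_append, List.length_cons, List.length_nil,
        List.append_assoc, List.cons_append, List.nil_append] at h2
      simp only [List.length_cons, List.take_succ_cons, PySem.List.enumerate_cons,
        List.map_cons, h1, List.zip_cons_cons]
      rw [show ((ds.length : Int) + 1) = ((ds.length + 1 : Nat) : Int) by push_cast; ring]
      rw [h2]

theorem pv_enum_zip (p : List String) (cs : List Int) :
    (PySem.List.enumerate (p.take cs.length) 0).map
        (fun q => (q.2, PySem.List.pyGetD cs q.1 0)) = p.zip cs := by
  simpa using pv_enum_zip_aux p cs []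

-- zip distributes over append on the left (unconditionally).
theorem pv_zip_append (p r : List String) (cs : List Int) :
    (p ++ r).zip cs = p.zip cs ++ r.zip (cs.drop p.length) := by
  induction p generalizing cs with
  | nil => simp
  | cons a p ih =>
    cases cs with
    | nil => simp
    | cons c cs => simp [ih]

-- A's two insertion loops build the dict fold over (p ++ r).zip (sorted desc values).
theorem pv_A_main (p r : List String) (cs : List Int) :
    (r.zip (cs.drop p.length)).foldl (fun d q => d.insert q.1 q.2)
      ((PySem.List.enumerate (p.take cs.length) 0).foldl
        (fun d q => d.insert q.2 (PySem.List.pyGetD cs q.1 0)) PySem.Dict.empty)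
    = ((p ++ r).zip cs).foldl (fun d q => d.insert q.1 q.2) PySem.Dict.empty := by
  have h1 : (PySem.List.enumerate (p.take cs.length) 0).foldl
      (fun d q => d.insert q.2 (PySem.List.pyGetD cs q.1 0)) (PySem.Dict.empty (κ := String) (ν := Int))
      = (p.zip cs).foldl (fun d q => d.insert q.1 q.2) PySem.Dict.empty := by
    rw [← pv_enum_zip p cs, List.foldl_map]
  rw [h1, pv_zip_append, List.foldl_append]

-- a descending (≥-pairwise) rearrangement of pool IS sorted(pool, reverse=True)
-- (with key = id the order is antisymmetric, so the descending list is unique).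
theorem pv_sortedRev_unique (pool ys : List Int) (hperm : ys.Perm pool)
    (hpw : ys.Pairwise (fun a b => b ≤ a)) :
    PySem.List.sorted pool (fun x => x) true = ys := by
  have h1 : (PySem.List.sorted pool (fun x => x) true).Perm ys :=
    (PySem.List.sorted_perm pool _ true).trans hperm.symm
  exact List.Perm.eq_of_pairwise (fun a b _ _ h h' => le_antisymm h' h)
    (PySem.List.sorted_pairwise_rev pool _) hpw h1

-- pulling the max off the pool peels the head of the descending sort
theorem pv_sortedRev_cons (pool : List Int) (m : Int)
    (hm : PySem.List.max? pool (fun x => x) = some m) :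
    PySem.List.sorted pool (fun x => x) true
      = m :: PySem.List.sorted (pool.erase m) (fun x => x) true := by
  have hmem : m ∈ pool := PySem.List.max?_mem hm
  apply pv_sortedRev_unique
  · exact ((PySem.List.sorted_perm _ _ true).cons m).trans (List.perm_cons_erase hmem).symm
  · refine List.pairwise_cons.mpr ⟨?_, PySem.List.sorted_pairwise_rev _ _⟩
    intro y hy
    exact PySem.List.max?_isMax hm y (List.mem_of_mem_erase ((PySem.List.mem_sorted _ _ _ _).mp hy))

-- B's selection loop computes the fold of slots zipped with the descending sort
theorem pv_select_eq (ordered : List String) (pool : List Int) (d : PySem.Dict String Int) :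
    pvSelectLoop ordered pool d
      = (ordered.zip (PySem.List.sorted pool (fun x => x) true)).foldl
          (fun d q => d.insert q.1 q.2) d := by
  induction ordered generalizing pool d with
  | nil => rfl
  | cons a rest ih =>
    by_cases hp : pool = []
    · subst hp; rfl
    · obtain ⟨m, hm⟩ : ∃ m, PySem.List.max? pool (fun x => x) = some m := by
        cases h : PySem.List.max? pool (fun x => x) with
        | none => exact absurd ((PySem.List.max?_eq_none_iff pool _).mp h) hp
        | some m => exact ⟨m, rfl⟩
      have hmem : m ∈ pool := PySem.List.max?_mem hm
      have hrm : PySem.List.remove? pool m = some (pool.erase m) :=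
        PySem.List.remove?_eq_some_erase pool m hmem
      rw [pvSelectLoop, if_neg (by simp [hp]), pv_sortedRev_cons pool m hm]
      simp only [hm, hrm, Option.getD_some, List.zip_cons_cons, List.foldl_cons]
      exact ih (pool.erase m) (d.insert a m)

-- ===== VERDICT (by name: the statement is the Claim_ definition above) =====
theorem optimize_scores_for_class_spec : Claim_equal_optimize_scores_for_class := by
  intro scores class_name allow_reallocation _
  unfold Spec_optimize_scores_for_class optimize_scores_for_class optimize_scores_for_class_alt
  split
  · rfl
  · dsimp only
    rw [PySem.List.slice_to _ (Int.natCast_nonneg _), PySem.List.slice_from _ (Int.natCast_nonneg _)]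
    simp only [Int.toNat_natCast]
    rw [pv_A_main, pv_select_eq]
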